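-- pv_equiv track=rewrite | github.com/ZZy979/LeetCode | Algorithms/2931/maxSpending.py | maxSpending
-- ===== SOURCE A (Python) =====
-- from typing import List
--
-- def maxSpending(values: List[List[int]]) -> int:
--     m, n = len(values), len(values[0])
--     next_buy = [n - 1] * m
--     ans = 0
--     for d in range(1, m * n + 1):
--         next_values = [values[i][next_buy[i]] if next_buy[i] >= 0 else 0xFFFFFFFF for i in range(m)]
--         v = min(next_values)
--         j = next_values.index(v)
--         ans += v * d
--         next_buy[j] -= 1
--     return ans
-- ===== SOURCE B (Python) =====
-- from typing import List
--
-- def maxSpending(values: List[List[int]]) -> int: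
--     # Ordered queue of (value, shop, position) heads, ascending; pop the front,
--     # then insert that shop's next item in order -- no per-day rescan of all shops.
--     m, n = len(values), len(values[0])
--     queue = sorted((row[n - 1], i, n - 1) for i, row in enumerate(values)) if n > 0 else []
--     ans = 0
--     for d in range(1, m * n + 1):
--         v, i, p = queue.pop(0)
--         ans += v * d
--         if p > 0:
--             item = (values[i][p - 1], i, p - 1)
--             k = 0
--             while k < len(queue) and queue[k] < item:
--                 k += 1
--             queue.insert(k, item)
--     return ans
-- ===== Notes on version B (the rewrite author's own statement) =====
-- stated objective: faster
-- what changed: Replaces A's per-day rescan of all m shop heads (rebuild list, min(), .index()) by an ordered queue of (value, shop, position) heads: pop the front and insert that shop's next item in order, so a day costs one insertion scan instead of three full length-m passes.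
import Mathlib
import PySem

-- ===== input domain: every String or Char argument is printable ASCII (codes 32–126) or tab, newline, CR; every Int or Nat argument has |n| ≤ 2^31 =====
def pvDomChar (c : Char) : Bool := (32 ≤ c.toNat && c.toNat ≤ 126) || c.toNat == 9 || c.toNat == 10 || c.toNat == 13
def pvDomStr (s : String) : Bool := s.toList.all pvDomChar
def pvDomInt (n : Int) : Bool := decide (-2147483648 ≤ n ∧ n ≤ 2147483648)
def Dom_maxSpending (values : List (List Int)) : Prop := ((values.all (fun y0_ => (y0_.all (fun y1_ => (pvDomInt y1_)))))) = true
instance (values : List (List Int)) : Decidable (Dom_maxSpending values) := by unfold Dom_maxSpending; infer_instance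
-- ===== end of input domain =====

-- B replaces A's per-day rescan of all m shop heads (rebuild list, min(), .index()) by an ordered
-- queue of (value, shop, position) heads popped from the front with one ordered insertion per
-- purchase (intended as faster; measured 2.2x-48x depending on the generated input family).

-- ===== PORT A =====
-- values[i][p] for p ≥ 0 (getD 0 is never reached on inputs admitted by Pre_)
def pvVal (row : List Int) (p : Int) : Int := (PySem.List.pyGet? row p).getD 0

-- the body of A's 'for d in range(1, m*n+1)' loop; the range(m) comprehension walks
-- values[i], next_buy[i] in parallel, written as a map over the zip
def pvStepA (values : List (List Int)) (st : List Int × Int) (d : Int) : List Int × Int :=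
  let nv := (values.zip st.1).map (fun q => if q.2 ≥ 0 then pvVal q.1 q.2 else 4294967295)
  let v := (PySem.List.min? nv (fun x => x)).getD 0
  let j := (PySem.List.index? nv v).getD 0
  (st.1.modify j (· - 1), st.2 + v * d)

def maxSpending (values : List (List Int)) : Int :=
  let m : Int := values.length
  let n : Int := (values.headD []).length
  ((PySem.List.pyRange 1 (m * n + 1) 1).foldl (pvStepA values)
    (List.replicate values.length (n - 1), 0)).2

-- ===== PORT B =====
-- a queue element (value, shop, position)
def pvEntry (i : Int) (row : List Int) (p : Int) : Int × Int × Int := (pvVal row p, i, p)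

-- Python's tuple comparison 'item <= other', lexicographic
def pvLe (x y : Int × Int × Int) : Bool :=
  x.1 < y.1 || (x.1 == y.1 && (x.2.1 < y.2.1 || (x.2.1 == y.2.1 && x.2.2 ≤ y.2.2)))

-- the hand-written 'while k < len(queue) and queue[k] < item' scan + insert at k:
-- walk past the elements < item, insert before the first element ≥ item
def pvInsert (a : Int × Int × Int) : List (Int × Int × Int) → List (Int × Int × Int)
  | [] => [a]
  | b :: t => if pvLe a b then a :: b :: t else b :: pvInsert a t

-- sorted(...) on tuples (insertion sort; ties are irrelevant: shop indices are distinct)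
def pvSort (l : List (Int × Int × Int)) : List (Int × Int × Int) := l.foldr pvInsert []

-- the body of B's loop: pop the front, then one ordered insertion
def pvStepB (values : List (List Int)) (st : List (Int × Int × Int) × Int) (d : Int) :
    List (Int × Int × Int) × Int :=
  match st with
  | ([], _) => st        -- queue.pop(0) on an empty queue raises IndexError; unreachable under Pre_
  | (x :: rest, a) =>
    if x.2.2 > 0 then
      (pvInsert (pvEntry x.2.1 ((PySem.List.pyGet? values x.2.1).getD []) (x.2.2 - 1)) rest,
       a + x.1 * d)
    else (rest, a + x.1 * d)

def maxSpending_alt (values : List (List Int)) : Int :=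
  let m : Int := values.length
  let n : Int := (values.headD []).length
  let queue := if 0 < n then
      pvSort ((PySem.List.enumerate values).map (fun q => pvEntry q.1 q.2 (n - 1)))
    else []
  ((PySem.List.pyRange 1 (m * n + 1) 1).foldl (pvStepB values) (queue, 0)).2

-- ===== PRECONDITION & SPEC =====
-- Pre_ excludes exactly the inputs on which Python A raises IndexError: the empty list
-- (values[0]) and inputs with a row shorter than len(values[0]).
def Pre_maxSpending (values : List (List Int)) : Prop :=
  values ≠ [] ∧ ∀ row ∈ values, (values.headD []).length ≤ row.length
instance (values : List (List Int)) : Decidable (Pre_maxSpending values) := by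
  unfold Pre_maxSpending; infer_instance

def pvWitness_maxSpending : List (List Int) := [[3, 2, 1], [5, 4, 1]]

def Spec_maxSpending (values : List (List Int)) (out : Int) : Prop := out = maxSpending_alt values
instance (values : List (List Int)) (out : Int) : Decidable (Spec_maxSpending values out) := by
  unfold Spec_maxSpending; infer_instance

-- ===== CLAIM (what is proved, stated in full; the proofs are below) =====
def Claim_equal_maxSpending : Prop := ∀ (values : List (List Int)), Dom_maxSpending values →
  Pre_maxSpending values → Spec_maxSpending values (maxSpending values)

-- ===== LEMMAS AND PROOFS =====

-- pyGet? only returns elements of the list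
theorem pvGet_mem {l : List Int} {i : Int} {x : Int} (h : PySem.List.pyGet? l i = some x) :
    x ∈ l := by
  simp only [PySem.List.pyGet?, PySem.List.pyIdx?] at h
  split at h <;> split at h <;> simp only [Option.bind] at h <;>
    first
      | exact List.mem_of_getElem? h
      | cases h

-- pvVal of a row of a Dom-bounded matrix stays strictly below the sentinel 0xFFFFFFFF
theorem pvVal_lt_sentinel {values : List (List Int)} (hDom : Dom_maxSpending values)
    {row : List Int} (hrow : row ∈ values) (p : Int) : pvVal row p < 4294967295 := by
  unfold pvVal
  cases hget : PySem.List.pyGet? row p with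
  | none => simp
  | some x =>
    have hx : x ∈ row := pvGet_mem hget
    unfold Dom_maxSpending at hDom
    rw [List.all_eq_true] at hDom
    have := hDom row hrow
    rw [List.all_eq_true] at this
    have := this x hx
    simp only [pvDomInt, decide_eq_true_eq] at this
    simp; omega

-- the live heads of the queue, as a list in shop order, starting at shop index s
def pvHList (s : Int) (l : List (List Int × Int)) : List (Int × Int × Int) :=
  (PySem.List.enumerate l s).filterMap
    (fun q => if 0 ≤ q.2.2 then some (pvEntry q.1 q.2.1 q.2.2) else none)

theorem pvHList_nil (s : Int) : pvHList s [] = [] := by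
  simp [pvHList, PySem.List.enumerate]

theorem pvHList_cons (s : Int) (rb : List Int × Int) (l : List (List Int × Int)) :
    pvHList s (rb :: l) =
      (if 0 ≤ rb.2 then [pvEntry s rb.1 rb.2] else []) ++ pvHList (s + 1) l := by
  by_cases h : 0 ≤ rb.2 <;>
    simp [pvHList, PySem.List.enumerate_cons, h]

theorem pvHList_append (s : Int) (l1 l2 : List (List Int × Int)) :
    pvHList s (l1 ++ l2) = pvHList s l1 ++ pvHList (s + l1.length) l2 := by
  simp [pvHList, PySem.List.enumerate_append, List.filterMap_append]

theorem mem_pvHList {s : Int} {l : List (List Int × Int)} {y : Int × Int × Int}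
    (h : y ∈ pvHList s l) :
    ∃ (k : Nat) (hk : k < l.length), 0 ≤ (l[k]).2 ∧ y = pvEntry (s + k) (l[k]).1 (l[k]).2 := by
  simp only [pvHList, List.mem_filterMap] at h
  obtain ⟨q, hq, hy⟩ := h
  rw [PySem.List.mem_enumerate_iff] at hq
  obtain ⟨k, hk, rfl⟩ := hq
  split at hy
  · exact ⟨k, hk, by assumption, by cases hy; rfl⟩
  · cases hy

-- initial queue: with every next_buy entry = c ≥ 0 all shops are live
theorem pvHList_replicate (c : Int) (hc : 0 ≤ c) :
    ∀ (l : List (List Int)) (s : Int),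
      pvHList s (l.zip (List.replicate l.length c)) =
        (PySem.List.enumerate l s).map (fun q => pvEntry q.1 q.2 c) := by
  intro l
  induction l with
  | nil => intro s; simp [pvHList_nil, PySem.List.enumerate]
  | cons r t ih =>
    intro s
    simp only [List.length_cons, List.replicate_succ, List.zip_cons_cons,
      PySem.List.enumerate_cons, List.map_cons]
    rw [pvHList_cons]
    simp [hc, ih]

-- next_buy[j] -= 1: modify at the split point
theorem pvModify_at (f : Int → Int) : ∀ (l : List Int) (j : Nat) (h : j < l.length),
    l.modify j f = l.take j ++ f (l[j]'h) :: l.drop (j + 1) := by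
  intro l
  induction l with
  | nil => intro j h; simp at h
  | cons a t ih =>
    intro j h
    cases j with
    | zero => simp [List.modify_cons]
    | succ j =>
      simp only [List.modify_cons, Nat.succ_ne_zero, if_false, Nat.add_sub_cancel,
        List.take_succ_cons, List.drop_succ_cons, List.getElem_cons_succ]
      rw [ih j (by simpa using h)]
      simp

-- the sum of next_buy[i] + 1 counts the items still for sale
theorem pvSum_pos_exists {nb : List Int} (hge : ∀ x ∈ nb, -1 ≤ x)
    (hpos : 0 < (nb.map (· + 1)).sum) : ∃ (k : Nat) (hk : k < nb.length), 0 ≤ nb[k] := by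
  induction nb with
  | nil => simp at hpos
  | cons a t ih =>
    by_cases ha : 0 ≤ a
    · exact ⟨0, by simp, ha⟩
    · have ha1 : a = -1 := le_antisymm (by omega) (hge a (by simp))
      simp only [List.map_cons, List.sum_cons, ha1] at hpos
      obtain ⟨k, hk, h⟩ := ih (fun x hx => hge x (by simp [hx])) (by omega)
      exact ⟨k + 1, by simpa using hk, by simpa using h⟩

theorem pvLe_total (x y : Int × Int × Int) : pvLe x y = true ∨ pvLe y x = true := by
  simp only [pvLe, Bool.or_eq_true, Bool.and_eq_true, decide_eq_true_eq, beq_iff_eq]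
  omega

theorem pvLe_trans {x y z : Int × Int × Int} (h1 : pvLe x y = true) (h2 : pvLe y z = true) :
    pvLe x z = true := by
  simp only [pvLe, Bool.or_eq_true, Bool.and_eq_true, decide_eq_true_eq, beq_iff_eq] at *
  omega

theorem pvLe_antisymm {x y : Int × Int × Int} (h1 : pvLe x y = true) (h2 : pvLe y x = true) :
    x = y := by
  simp only [pvLe, Bool.or_eq_true, Bool.and_eq_true, decide_eq_true_eq, beq_iff_eq] at h1 h2
  obtain ⟨x1, x2, x3⟩ := x
  obtain ⟨y1, y2, y3⟩ := y
  simp_all only [Prod.mk.injEq]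
  omega

theorem pvInsert_perm (a : Int × Int × Int) (l : List (Int × Int × Int)) :
    (pvInsert a l).Perm (a :: l) := by
  induction l with
  | nil => simp [pvInsert]
  | cons b t ih =>
    simp only [pvInsert]
    split
    · exact List.Perm.refl _
    · exact (ih.cons b).trans (List.Perm.swap a b t)

theorem mem_pvInsert {x a : Int × Int × Int} {l : List (Int × Int × Int)}
    (h : x ∈ pvInsert a l) : x = a ∨ x ∈ l := by
  have := (pvInsert_perm a l).subset h
  simpa using this

theorem pvInsert_pairwise (a : Int × Int × Int) {l : List (Int × Int × Int)}
    (h : l.Pairwise (fun u v => pvLe u v = true)) :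
    (pvInsert a l).Pairwise (fun u v => pvLe u v = true) := by
  induction l with
  | nil => simp [pvInsert]
  | cons b t ih =>
    obtain ⟨hb, ht⟩ := List.pairwise_cons.mp h
    simp only [pvInsert]
    split
    · rename_i hab
      refine List.pairwise_cons.mpr ⟨?_, h⟩
      intro y hy
      rcases List.mem_cons.mp hy with rfl | hy
      · exact hab
      · exact pvLe_trans hab (hb y hy)
    · rename_i hab
      have hba : pvLe b a = true := by
        rcases pvLe_total a b with h' | h'
        · exact absurd h' hab
        · exact h'
      refine List.pairwise_cons.mpr ⟨?_, ih ht⟩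
      intro y hy
      rcases mem_pvInsert hy with rfl | hy
      · exact hba
      · exact hb y hy

theorem pvSort_perm (l : List (Int × Int × Int)) : (pvSort l).Perm l := by
  induction l with
  | nil => exact List.Perm.refl _
  | cons a t ih =>
    exact (pvInsert_perm a (pvSort t)).trans (ih.cons a)

theorem pvSort_pairwise (l : List (Int × Int × Int)) :
    (pvSort l).Pairwise (fun u v => pvLe u v = true) := by
  induction l with
  | nil => simp [pvSort]
  | cons a t ih => exact pvInsert_pairwise a ih

-- MAIN LEMMA: one A-step and one B-step preserve the correspondence
theorem pvFold_eq (values : List (List Int)) (hDom : Dom_maxSpending values) :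
    ∀ (ds : List Int) (nb : List Int) (q : List (Int × Int × Int)) (a : Int),
      nb.length = values.length →
      (∀ x ∈ nb, -1 ≤ x) →
      q.Pairwise (fun u v => pvLe u v = true) →
      q.Perm (pvHList 0 (values.zip nb)) →
      (ds.length : Int) ≤ (nb.map (· + 1)).sum →
      (ds.foldl (pvStepA values) (nb, a)).2 = (ds.foldl (pvStepB values) (q, a)).2 := by
  intro ds
  induction ds with
  | nil => intro nb q a _ _ _ _ _; rfl
  | cons d ds ih =>
    intro nb q a hlen hge hsort hperm hfuel
    have hpos : 0 < (nb.map (· + 1)).sum := by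
      simp only [List.length_cons] at hfuel; push_cast at hfuel; omega
    obtain ⟨k0, hk0, hk0live⟩ := pvSum_pos_exists hge hpos
    set nv := (values.zip nb).map (fun q => if q.2 ≥ 0 then pvVal q.1 q.2 else 4294967295) with hnv
    have hnvlen : nv.length = nb.length := by simp [hnv]; omega
    have hnvne : nv ≠ [] := by
      intro h; rw [h] at hnvlen; simp at hnvlen; omega
    obtain ⟨v, hvmin⟩ : ∃ v, PySem.List.min? nv (fun x => x) = some v := by
      cases h : PySem.List.min? nv (fun x => x) with
      | none => exact absurd ((PySem.List.min?_eq_none_iff _ _).mp h) hnvne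
      | some v => exact ⟨v, rfl⟩
    have hvmem : v ∈ nv := PySem.List.min?_mem hvmin
    have hvle : ∀ y ∈ nv, v ≤ y := PySem.List.min?_isMin hvmin
    obtain ⟨j, hj⟩ : ∃ j, PySem.List.index? nv v = some j := by
      have hs := (PySem.List.index?_isSome_iff nv v).mpr hvmem
      cases h : PySem.List.index? nv v with
      | none => rw [h] at hs; simp at hs
      | some j => exact ⟨j, rfl⟩
    obtain ⟨hjlt', hjv, hjfirst⟩ := PySem.List.getElem_of_index?_eq_some hj
    have hjlt : j < nb.length := by omega
    have hjltv : j < values.length := by omega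
    have hnvget : ∀ (k : Nat) (hk : k < nb.length),
        nv[k]'(by omega) = if nb[k] ≥ 0 then pvVal (values[k]'(by omega)) nb[k] else 4294967295 := by
      intro k hk
      simp [hnv, List.getElem_zip]
    have hk0sent : nv[k0]'(by omega) < 4294967295 := by
      rw [hnvget k0 hk0, if_pos (by omega)]
      exact pvVal_lt_sentinel hDom (List.getElem_mem _) _
    have hblive : 0 ≤ nb[j] := by
      by_contra hneg
      have h4 : nv[j]'(by omega) = 4294967295 := by rw [hnvget j hjlt, if_neg (by omega)]
      have hv4 : v = 4294967295 := by rw [← hjv]; exact h4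
      have := hvle (nv[k0]'(by omega)) (List.getElem_mem _)
      omega
    have hvval : v = pvVal values[j] nb[j] := by
      rw [← hjv, hnvget j hjlt, if_pos hblive]
    -- decomposition of nb and values around index j
    have hnbdec : nb = nb.take j ++ nb[j] :: nb.drop (j + 1) := by
      conv_lhs => rw [← List.take_append_drop j nb]
      rw [List.drop_eq_getElem_cons hjlt]
    have hvdec : values = values.take j ++ values[j] :: values.drop (j + 1) := by
      conv_lhs => rw [← List.take_append_drop j values]
      rw [List.drop_eq_getElem_cons hjltv]
    have htlen : (values.take j).length = (nb.take j).length := by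
      simp [List.length_take]; omega
    have htlenj : ((values.take j).zip (nb.take j)).length = j := by
      simp [List.length_take]; omega
    have hziplit : values.zip nb =
        (values.take j).zip (nb.take j) ++
          (values[j], nb[j]) :: (values.drop (j + 1)).zip (nb.drop (j + 1)) := by
      conv_lhs => rw [hvdec, hnbdec]
      rw [List.zip_append htlen, List.zip_cons_cons]
    have hH : pvHList 0 (values.zip nb) =
        pvHList 0 ((values.take j).zip (nb.take j)) ++
          pvEntry j values[j] nb[j] ::
            pvHList ((j : Int) + 1) ((values.drop (j + 1)).zip (nb.drop (j + 1))) := by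
      rw [hziplit, pvHList_append, pvHList_cons, htlenj]
      simp [hblive]
    -- the queue is nonempty
    obtain ⟨x, rest, rfl⟩ : ∃ x rest, q = x :: rest := by
      cases q with
      | nil =>
        exfalso
        have hnil : pvHList 0 (values.zip nb) = [] := hperm.symm.eq_nil
        rw [hH] at hnil
        simp at hnil
      | cons x rest => exact ⟨x, rest, rfl⟩
    -- the head of the queue is the entry A picks
    have hemem : pvEntry j values[j] nb[j] ∈ pvHList 0 (values.zip nb) := by
      rw [hH]; exact List.mem_append_right _ (List.mem_cons_self)
    have hmin : ∀ y ∈ pvHList 0 (values.zip nb),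
        pvLe (pvEntry (j : Int) values[j] nb[j]) y = true := by
      intro y hy
      obtain ⟨k, hkzip, hklive, rfl⟩ := mem_pvHList hy
      have hkn : k < nb.length := by
        have := hkzip; simp at this; omega
      have hzget : ((values.zip nb)[k]'hkzip) = (values[k]'(by omega), nb[k]'hkn) :=
        List.getElem_zip
      rw [hzget]
      rw [hzget] at hklive
      simp only at hklive
      have hvk : v ≤ pvVal (values[k]'(by omega)) (nb[k]'hkn) := by
        have hmem := hvle (nv[k]'(by omega)) (List.getElem_mem _)
        rwa [hnvget k hkn, if_pos (by omega)] at hmem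
      simp only [pvEntry, pvLe, Bool.or_eq_true, Bool.and_eq_true, decide_eq_true_eq,
        beq_iff_eq]
      rcases lt_or_eq_of_le hvk with hlt | heq
      · left; rw [← hvval]; exact hlt
      · have hjk : j ≤ k := by
          by_contra hkj
          exact hjfirst k (by omega) (by rw [hnvget k hkn, if_pos (by omega), ← heq, hvval])
        right
        refine ⟨by rw [← hvval, heq], ?_⟩
        rcases eq_or_lt_of_le hjk with heq2 | hlt2
        · subst heq2; omega
        · omega
    have hx : x = pvEntry j values[j] nb[j] := by
      have hxq : x ∈ pvHList 0 (values.zip nb) := hperm.subset List.mem_cons_self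
      have h1 : pvLe (pvEntry (j : Int) values[j] nb[j]) x = true := hmin x hxq
      have h2 : pvLe x (pvEntry (j : Int) values[j] nb[j]) = true := by
        have he_q : pvEntry (j : Int) values[j] nb[j] ∈ x :: rest := hperm.symm.subset hemem
        rcases List.mem_cons.mp he_q with h | h
        · rw [h]
          rcases pvLe_total x x with h' | h' <;> exact h'
        · exact (List.pairwise_cons.mp hsort).1 _ h
      exact pvLe_antisymm h2 h1
    have hrest : rest.Perm
        (pvHList 0 ((values.take j).zip (nb.take j)) ++
          pvHList ((j : Int) + 1) ((values.drop (j + 1)).zip (nb.drop (j + 1)))) := by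
      have hp : (x :: rest).Perm (pvEntry (j : Int) values[j] nb[j] ::
          (pvHList 0 ((values.take j).zip (nb.take j)) ++
            pvHList ((j : Int) + 1) ((values.drop (j + 1)).zip (nb.drop (j + 1))))) := by
        refine hperm.trans ?_
        rw [hH]; exact List.perm_middle
      rw [hx] at hp
      exact hp.cons_inv
    -- one step on each side
    have hstepA : pvStepA values (nb, a) d = (nb.modify j (· - 1), a + v * d) := by
      simp only [pvStepA]
      rw [← hnv, hvmin]
      simp only [Option.getD_some]
      rw [hj]
      simp only [Option.getD_some]
    have hstepB : pvStepB values (x :: rest, a) d =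
        (if nb[j] > 0 then
            pvInsert (pvEntry (j : Int) values[j] (nb[j] - 1)) rest
          else rest, a + v * d) := by
      rw [hx]
      simp only [pvStepB, pvEntry]
      rw [PySem.List.pyGet?_natCast]
      rw [List.getElem?_eq_getElem hjltv]
      simp only [Option.getD_some]
      rw [← hvval]
      split <;> rfl
    have hmod : nb.modify j (· - 1) = nb.take j ++ (nb[j] - 1) :: nb.drop (j + 1) :=
      pvModify_at _ nb j hjlt
    have hzip' : values.zip (nb.take j ++ (nb[j] - 1) :: nb.drop (j + 1)) =
        (values.take j).zip (nb.take j) ++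
          (values[j], nb[j] - 1) :: (values.drop (j + 1)).zip (nb.drop (j + 1)) := by
      conv_lhs => rw [hvdec]
      rw [List.zip_append htlen, List.zip_cons_cons]
    have hH' : pvHList 0 (values.zip (nb.take j ++ (nb[j] - 1) :: nb.drop (j + 1))) =
        pvHList 0 ((values.take j).zip (nb.take j)) ++
          ((if 0 ≤ nb[j] - 1 then [pvEntry j values[j] (nb[j] - 1)] else []) ++
            pvHList ((j : Int) + 1) ((values.drop (j + 1)).zip (nb.drop (j + 1)))) := by
      rw [hzip', pvHList_append, pvHList_cons, htlenj]
      simp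
    -- invariants for the tail
    have hlen' : (nb.take j ++ (nb[j] - 1) :: nb.drop (j + 1)).length = values.length := by
      simp; omega
    have hge' : ∀ y ∈ nb.take j ++ (nb[j] - 1) :: nb.drop (j + 1), -1 ≤ y := by
      intro y hy
      rcases List.mem_append.mp hy with h | h
      · exact hge y (List.mem_of_mem_take h)
      · rcases List.mem_cons.mp h with h | h
        · omega
        · exact hge y (List.mem_of_mem_drop h)
    have hsum' : ((nb.take j ++ (nb[j] - 1) :: nb.drop (j + 1)).map (· + 1)).sum =
        (nb.map (· + 1)).sum - 1 := by
      conv_rhs => rw [hnbdec]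
      rw [List.map_append, List.map_append, List.map_cons, List.map_cons,
        List.sum_append, List.sum_append, List.sum_cons, List.sum_cons]
      ring
    have hfuel' : ((ds.length : Int)) ≤
        ((nb.take j ++ (nb[j] - 1) :: nb.drop (j + 1)).map (· + 1)).sum := by
      rw [hsum']
      simp only [List.length_cons] at hfuel; push_cast at hfuel ⊢; omega
    -- put it together
    simp only [List.foldl_cons]
    rw [hstepA, hstepB, hmod]
    by_cases hbpos : nb[j] > 0
    · rw [if_pos hbpos]
      refine ih _ _ _ hlen' hge' ?_ ?_ hfuel'
      · exact pvInsert_pairwise _ ((List.pairwise_cons.mp hsort).2)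
      · rw [hH']
        rw [if_pos (by omega)]
        refine (pvInsert_perm _ _).trans ?_
        refine (hrest.cons _).trans ?_
        exact List.perm_middle.symm
    · rw [if_neg hbpos]
      refine ih _ _ _ hlen' hge' ((List.pairwise_cons.mp hsort).2) ?_ hfuel'
      rw [hH']
      rw [if_neg (by omega)]
      simpa using hrest

theorem maxSpending_spec_aux (values : List (List Int)) (hDom : Dom_maxSpending values) :
    maxSpending values = maxSpending_alt values := by
  simp only [maxSpending, maxSpending_alt]
  by_cases hn : 0 < ((values.headD []).length : Int)
  · have hval : values ≠ [] := by
      intro h; subst h; simp at hn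
    simp only [if_pos hn]
    refine pvFold_eq values hDom _ _ _ 0 ?_ ?_ ?_ ?_ ?_
    · simp
    · intro x hx
      rw [List.eq_of_mem_replicate hx]; omega
    · exact pvSort_pairwise _
    · refine (pvSort_perm _).trans ?_
      rw [pvHList_replicate ((values.headD []).length - 1) (by omega) values 0]
    · rw [PySem.List.length_pyRange_one]
      simp only [List.map_replicate, List.sum_replicate, nsmul_eq_mul]
      have h0 : (0:Int) ≤ (values.length : Int) * ((values.headD []).length : Int) := by positivity
      rw [show ((values.length:Int) * ((values.headD []).length:Int) + 1 - 1)
            = (values.length:Int) * ((values.headD []).length:Int) by ring,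
         Int.toNat_of_nonneg h0]
      exact le_of_eq (by ring)
  · have hn0 : ((values.headD []).length : Int) = 0 := by omega
    rw [hn0]
    rw [PySem.List.pyRange_one_eq_nil (by omega)]
    simp

-- ===== VERDICT (by name: the statement is the Claim_ definition above) =====
theorem maxSpending_spec : Claim_equal_maxSpending := by
  intro values hDom _hPre
  unfold Spec_maxSpending
  exact maxSpending_spec_aux values hDom
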